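-- pv_equiv track=rewrite | github.com/Hugo-Oh/Algorithm_Data_Structure | 1260, DFS_BFS, S2, BFS_DFS/A2.py | solution
-- ===== SOURCE A (Python) =====
-- def solution(price, cost):
--     price_maxx = 0
--     sales_maxx = 0
--     for pric in price:
--         sales = sum([pric-y if x >= pric > y else 0 for x, y in zip(price, cost)])
--
--         if sales_maxx < sales:
--             sales_maxx = sales
--             price_maxx = pric
--
--     return price_maxx
-- ===== SOURCE B (Python) =====
-- def solution(price, cost):
--     # Profitable intervals: a pair (x, y) contributes (p - y) to the sales at
--     # candidate price p exactly when y < p <= x.  Sweep the distinct candidate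
--     # prices in increasing order, maintaining for the current p the count and
--     # y-sum of pairs with y < p (from a y-sorted list) and of pairs with x < p
--     # (from an x-sorted list); their differences give sales(p) = p*K - Y.
--     pairs = [(x, y) for x, y in zip(price, cost) if y < x]
--     ys = sorted(y for x, y in pairs)
--     xys = sorted(pairs, key=lambda t: t[0])
--     table = {}
--     i = j = 0
--     c1 = s1 = c2 = s2 = 0
--     for p in sorted(set(price)):
--         while i < len(ys) and ys[i] < p:
--             c1 += 1
--             s1 += ys[i]
--             i += 1
--         while j < len(xys) and xys[j][0] < p:
--             c2 += 1
--             s2 += xys[j][1]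
--             j += 1
--         table[p] = p * (c1 - c2) - (s1 - s2)
--     best_price = 0
--     best_sales = 0
--     for p in price:
--         s = table[p]
--         if best_sales < s:
--             best_sales = s
--             best_price = p
--     return best_price
-- ===== Notes on version B (the rewrite author's own statement) =====
-- stated objective: faster
-- what changed: A recomputes the conditional profit sum from scratch for every candidate price (O(n^2)); B sorts the profitable (price,cost) pairs and sweeps the distinct candidate prices in increasing order with two monotone pointers maintaining running count/cost-sum aggregates, so sales(p) = p*K - Y comes from the sweep table and a final linear scan picks the first strict maximum in original order.
import Mathlib
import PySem

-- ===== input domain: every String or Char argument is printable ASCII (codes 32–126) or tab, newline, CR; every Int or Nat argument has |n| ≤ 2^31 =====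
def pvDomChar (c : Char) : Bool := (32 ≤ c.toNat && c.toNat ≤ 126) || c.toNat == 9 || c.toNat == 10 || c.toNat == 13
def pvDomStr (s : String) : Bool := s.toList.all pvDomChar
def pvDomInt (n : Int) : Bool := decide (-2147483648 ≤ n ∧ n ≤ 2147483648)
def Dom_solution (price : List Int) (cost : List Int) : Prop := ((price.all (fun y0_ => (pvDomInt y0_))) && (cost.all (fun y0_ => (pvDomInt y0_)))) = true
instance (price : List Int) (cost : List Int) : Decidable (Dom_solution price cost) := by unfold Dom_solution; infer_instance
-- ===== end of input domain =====

-- B replaces A's quadratic per-candidate rescan by a sort-and-sweep over the distinct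
-- candidate prices with running count/cost-sum aggregates (objective: faster, O(n log n)).

-- ===== PORT A =====
def solution (price : List Int) (cost : List Int) : Int :=
  (price.foldl (fun st pric =>
      let sales := ((price.zip cost).map
        (fun xy => if xy.1 ≥ pric ∧ pric > xy.2 then pric - xy.2 else 0)).sum
      if st.2 < sales then (pric, sales) else st) (0, 0)).1

-- ===== PORT B =====
-- "while i < len(l) and key(l[i]) < p: c += 1; s += val(l[i]); i += 1" —
-- consume the prefix with key < p, returning (count consumed, val-sum consumed, rest)
def popLt {α : Type} (key val : α → Int) (p : Int) : List α → Int × Int × List α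
  | [] => (0, 0, [])
  | a :: t =>
    if key a < p then
      let r := popLt key val p t
      (r.1 + 1, r.2.1 + val a, r.2.2)
    else (0, 0, a :: t)

-- the 'for p in sorted(set(price))' loop of Source B
def sweep (cands : List Int) (ys : List Int) (xys : List (Int × Int))
    (c1 s1 c2 s2 : Int) (table : PySem.Dict Int Int) : PySem.Dict Int Int :=
  match cands with
  | [] => table
  | p :: rest =>
    let r1 := popLt (fun y => y) (fun y => y) p ys
    let r2 := popLt (fun t => t.1) (fun t => t.2) p xys
    let c1' := c1 + r1.1
    let s1' := s1 + r1.2.1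
    let c2' := c2 + r2.1
    let s2' := s2 + r2.2.1
    sweep rest r1.2.2 r2.2.2 c1' s1' c2' s2'
      (table.insert p (p * (c1' - c2') - (s1' - s2')))

def solution_alt (price : List Int) (cost : List Int) : Int :=
  let pairs := (price.zip cost).filter (fun xy => xy.2 < xy.1)
  let ys := PySem.List.sorted (pairs.map (fun xy => xy.2)) (fun y => y) false
  let xys := PySem.List.sorted pairs (fun t => t.1) false
  let table := sweep (PySem.List.sorted (PySem.Set.ofList price) (fun x => x) false)
      ys xys 0 0 0 0 PySem.Dict.empty
  (price.foldl (fun st p =>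
      let s := table.getD p 0
      if st.2 < s then (p, s) else st) (0, 0)).1

-- ===== PRECONDITION & SPEC =====
def Spec_solution (price : List Int) (cost : List Int) (out : Int) : Prop := out = solution_alt price cost
instance (price : List Int) (cost : List Int) (out : Int) : Decidable (Spec_solution price cost out) := by unfold Spec_solution; infer_instance

-- ===== CLAIM (what is proved, stated in full; the proofs are below) =====
def Claim_equal_solution : Prop := ∀ (price : List Int) (cost : List Int), Dom_solution price cost → Spec_solution price cost (solution price cost)

-- ===== LEMMAS AND PROOFS =====

-- count / val-sum of the elements with key < p (the sweep's running aggregates)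
def cnt {α : Type} (key : α → Int) (p : Int) (l : List α) : Int :=
  ((l.filter (fun a => key a < p)).length : Int)

def sm {α : Type} (key val : α → Int) (p : Int) (l : List α) : Int :=
  ((l.filter (fun a => key a < p)).map val).sum

-- the value A computes for one candidate price
def salesSpec (price cost : List Int) (p : Int) : Int :=
  ((price.zip cost).map (fun xy => if xy.1 ≥ p ∧ p > xy.2 then p - xy.2 else 0)).sum

lemma popLt_eq {α : Type} (key val : α → Int) (p : Int) (l : List α)
    (hl : l.Pairwise (fun a b => key a ≤ key b)) :
    popLt key val p l = (cnt key p l, sm key val p l, l.filter (fun a => ¬ key a < p)) := by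
  induction l with
  | nil => simp [popLt, cnt, sm]
  | cons a t ih =>
    rcases List.pairwise_cons.mp hl with ⟨ha, ht⟩
    by_cases h : key a < p
    · simp only [popLt, if_pos h, ih ht, cnt, sm, List.filter_cons]
      simp [h, Int.add_comm]
    · have hall : ∀ b ∈ t, ¬ key b < p := fun b hb => by
        have := ha b hb; omega
      simp only [popLt, if_neg h, cnt, sm, List.filter_cons]
      have h1 : (t.filter (fun a => decide (key a < p))) = [] := by
        apply List.filter_eq_nil_iff.mpr
        intro b hb; simpa using hall b hb
      have h2 : (t.filter (fun b => decide (p ≤ key b))) = t := by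
        apply List.filter_eq_self.mpr
        intro b hb; simpa using not_lt.mp (hall b hb)
      simp [h, h1, h2]

lemma cnt_split {α : Type} (key : α → Int) (q p : Int) (h : q ≤ p) (l : List α) :
    cnt key p l = cnt key q l + cnt key p (l.filter (fun a => ¬ key a < q)) := by
  induction l with
  | nil => simp [cnt]
  | cons a t ih =>
    by_cases hq : key a < q
    · have hp : key a < p := lt_of_lt_of_le hq h
      simp only [cnt, List.filter_cons] at *
      simp [hq, hp] at *
      omega
    · simp only [cnt, List.filter_cons] at *
      by_cases hp : key a < p <;> simp [hq, hp] at * <;> omega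

lemma sm_split {α : Type} (key val : α → Int) (q p : Int) (h : q ≤ p) (l : List α) :
    sm key val p l = sm key val q l + sm key val p (l.filter (fun a => ¬ key a < q)) := by
  induction l with
  | nil => simp [sm]
  | cons a t ih =>
    by_cases hq : key a < q
    · have hp : key a < p := lt_of_lt_of_le hq h
      simp only [sm, List.filter_cons] at *
      simp [hq, hp] at *
      omega
    · simp only [sm, List.filter_cons] at *
      by_cases hp : key a < p <;> simp [hq, hp] at * <;> omega

lemma sweep_getD_not_mem (cands : List Int) (p : Int) (hp : p ∉ cands) :
    ∀ (ys : List Int) (xys : List (Int × Int)) (c1 s1 c2 s2 : Int) (table : PySem.Dict Int Int),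
    (sweep cands ys xys c1 s1 c2 s2 table).getD p 0 = table.getD p 0 := by
  induction cands with
  | nil => intro ys xys c1 s1 c2 s2 table; simp [sweep]
  | cons q rest ih =>
    intro ys xys c1 s1 c2 s2 table
    have hq : p ≠ q := fun h => hp (h ▸ List.mem_cons_self ..)
    have hrest : p ∉ rest := fun h => hp (List.mem_cons_of_mem _ h)
    simp only [sweep]
    rw [ih hrest]
    simp [PySem.Dict.getD_insert, hq]

lemma sweep_getD_mem (cands : List Int) (hc : cands.Pairwise (· < ·)) :
    ∀ (ys : List Int) (xys : List (Int × Int)) (c1 s1 c2 s2 : Int) (table : PySem.Dict Int Int),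
    ys.Pairwise (· ≤ ·) → xys.Pairwise (fun a b => a.1 ≤ b.1) →
    ∀ p ∈ cands,
    (sweep cands ys xys c1 s1 c2 s2 table).getD p 0 =
      p * ((c1 + cnt (fun y => y) p ys) - (c2 + cnt (fun t => t.1) p xys))
        - ((s1 + sm (fun y => y) (fun y => y) p ys) - (s2 + sm (fun t => t.1) (fun t => t.2) p xys)) := by
  induction cands with
  | nil => intro _ _ _ _ _ _ _ _ _ p hp; cases hp
  | cons q rest ih =>
    intro ys xys c1 s1 c2 s2 table hys hxys p hp
    rcases List.pairwise_cons.mp hc with ⟨hqr, hrest⟩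
    simp only [sweep]
    rw [popLt_eq _ _ _ _ hys, popLt_eq _ _ _ _ hxys]
    rcases List.mem_cons.mp hp with rfl | hpr
    · have hnot : p ∉ rest := fun h => lt_irrefl p (hqr p h)
      rw [sweep_getD_not_mem rest p hnot]
      rw [PySem.Dict.getD_insert_self]
    · have hys' : (ys.filter (fun a => ¬ a < q)).Pairwise (· ≤ ·) :=
        List.Pairwise.sublist List.filter_sublist hys
      have hxys' : (xys.filter (fun a => ¬ a.1 < q)).Pairwise (fun a b => a.1 ≤ b.1) :=
        List.Pairwise.sublist List.filter_sublist hxys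
      rw [ih hrest _ _ _ _ _ _ _ hys' hxys' p hpr]
      have hqp : q ≤ p := le_of_lt (hqr p hpr)
      rw [cnt_split (fun y => y) q p hqp ys, cnt_split (fun t => t.1) q p hqp xys,
          sm_split (fun y => y) (fun y => y) q p hqp ys,
          sm_split (fun t => t.1) (fun t => t.2) q p hqp xys]
      ring

lemma sum_map_eq_sum_filter {α : Type} (l : List α) (P : α → Prop) [DecidablePred P]
    (f : α → Int) (h : ∀ a ∈ l, ¬ P a → f a = 0) :
    (l.map f).sum = ((l.filter (fun a => P a)).map f).sum := by
  induction l with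
  | nil => simp
  | cons a t ih =>
    have ih' := ih (fun b hb => h b (List.mem_cons_of_mem _ hb))
    by_cases hP : P a
    · simp [hP, ih']
    · simp [hP, ih', h a (List.mem_cons_self ..) hP]

lemma sum_ite_eq_mul_sub (l : List (Int × Int)) (p : Int) :
    (l.map (fun xy => if xy.1 ≥ p ∧ p > xy.2 then p - xy.2 else 0)).sum =
      p * ((l.filter (fun xy => xy.1 ≥ p ∧ p > xy.2)).length : Int)
        - ((l.filter (fun xy => xy.1 ≥ p ∧ p > xy.2)).map (fun xy => xy.2)).sum := by
  induction l with
  | nil => simp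
  | cons a t ih =>
    by_cases hC : a.1 ≥ p ∧ p > a.2
    · simp [hC, ih]; ring
    · simp [hC, ih]

lemma cnt_cond_split (l : List (Int × Int)) (p : Int) (h : ∀ xy ∈ l, xy.2 < xy.1) :
    ((l.filter (fun xy => xy.1 ≥ p ∧ p > xy.2)).length : Int) =
      ((l.filter (fun xy => xy.2 < p)).length : Int)
        - ((l.filter (fun xy => xy.1 < p)).length : Int) := by
  induction l with
  | nil => simp
  | cons a t ih =>
    have ih' := ih (fun b hb => h b (List.mem_cons_of_mem _ hb))
    have hyx : a.2 < a.1 := h a (List.mem_cons_self ..)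
    by_cases hx : a.1 < p
    · have hy : a.2 < p := lt_trans hyx hx
      have hC : ¬ (a.1 ≥ p ∧ p > a.2) := by omega
      simp [hx, hy] at ih' ⊢; omega
    · by_cases hy : a.2 < p
      · have hC : a.1 ≥ p ∧ p > a.2 := by omega
        simp [hx, hy, hC] at ih' ⊢; omega
      · simp [hx, hy] at ih' ⊢; omega

lemma sm_cond_split (l : List (Int × Int)) (p : Int) (h : ∀ xy ∈ l, xy.2 < xy.1) :
    ((l.filter (fun xy => xy.1 ≥ p ∧ p > xy.2)).map (fun xy => xy.2)).sum =
      ((l.filter (fun xy => xy.2 < p)).map (fun xy => xy.2)).sum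
        - ((l.filter (fun xy => xy.1 < p)).map (fun xy => xy.2)).sum := by
  induction l with
  | nil => simp
  | cons a t ih =>
    have ih' := ih (fun b hb => h b (List.mem_cons_of_mem _ hb))
    have hyx : a.2 < a.1 := h a (List.mem_cons_self ..)
    by_cases hx : a.1 < p
    · have hy : a.2 < p := lt_trans hyx hx
      have hC : ¬ (a.1 ≥ p ∧ p > a.2) := by omega
      simp [hx, hy] at ih' ⊢; omega
    · by_cases hy : a.2 < p
      · have hC : a.1 ≥ p ∧ p > a.2 := by omega
        simp [hx, hy, hC] at ih' ⊢; omega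
      · simp [hx, hy] at ih' ⊢; omega

-- the sweep table contains A's per-candidate value at every price of the input
lemma table_getD_eq (price cost : List Int) (p : Int) (hp : p ∈ price) :
    (sweep (PySem.List.sorted (PySem.Set.ofList price) (fun x => x) false)
      (PySem.List.sorted (((price.zip cost).filter (fun xy => xy.2 < xy.1)).map (fun xy => xy.2)) (fun y => y) false)
      (PySem.List.sorted ((price.zip cost).filter (fun xy => xy.2 < xy.1)) (fun t => t.1) false)
      0 0 0 0 PySem.Dict.empty).getD p 0 = salesSpec price cost p := by
  set pairs := (price.zip cost).filter (fun xy => xy.2 < xy.1) with hpairs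
  have hmem : p ∈ PySem.List.sorted (PySem.Set.ofList price) (fun x => x) false := by
    rw [PySem.List.mem_sorted]
    exact (PySem.Set.mem_ofList _ _).mpr hp
  have hys : (PySem.List.sorted (pairs.map (fun xy => xy.2)) (fun y => y) false).Pairwise (· ≤ ·) :=
    PySem.List.sorted_pairwise _ _
  have hxys : (PySem.List.sorted pairs (fun t => t.1) false).Pairwise (fun a b => a.1 ≤ b.1) :=
    PySem.List.sorted_pairwise _ _
  rw [sweep_getD_mem _ (PySem.List.sorted_ofList_pairwise_lt _) _ _ _ _ _ _ _ hys hxys p hmem]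
  -- transfer the aggregates from the sorted lists back to `pairs`
  have permY : (PySem.List.sorted (pairs.map (fun xy => xy.2)) (fun y => y) false).Perm
      (pairs.map (fun xy => xy.2)) := PySem.List.sorted_perm _ _ _
  have permX : (PySem.List.sorted pairs (fun t => t.1) false).Perm pairs :=
    PySem.List.sorted_perm _ _ _
  have permYf := (permY.filter (fun a => decide (a < p)))
  have permXf := (permX.filter (fun a => decide (a.1 < p)))
  have hcntY : cnt (fun y => y) p (PySem.List.sorted (pairs.map (fun xy => xy.2)) (fun y => y) false)
      = ((pairs.filter (fun xy => xy.2 < p)).length : Int) := by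
    unfold cnt
    rw [permYf.length_eq, List.filter_map]
    simp [Function.comp_def]
  have hcntX : cnt (fun t => t.1) p (PySem.List.sorted pairs (fun t => t.1) false)
      = ((pairs.filter (fun xy => xy.1 < p)).length : Int) := by
    unfold cnt
    rw [permXf.length_eq]
  have hsmY : sm (fun y => y) (fun y => y) p (PySem.List.sorted (pairs.map (fun xy => xy.2)) (fun y => y) false)
      = ((pairs.filter (fun xy => xy.2 < p)).map (fun xy => xy.2)).sum := by
    unfold sm
    rw [(permYf.map (fun y => y)).sum_eq, List.filter_map]
    simp [Function.comp_def]
  have hsmX : sm (fun t => t.1) (fun t => t.2) p (PySem.List.sorted pairs (fun t => t.1) false)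
      = ((pairs.filter (fun xy => xy.1 < p)).map (fun xy => xy.2)).sum := by
    unfold sm
    rw [(permXf.map (fun t => t.2)).sum_eq]
  rw [hcntY, hcntX, hsmY, hsmX]
  simp only [zero_add]
  have hall : ∀ xy ∈ pairs, xy.2 < xy.1 := by
    intro xy hxy
    have := List.of_mem_filter hxy
    simpa using this
  rw [← cnt_cond_split pairs p hall, ← sm_cond_split pairs p hall]
  unfold salesSpec
  rw [sum_map_eq_sum_filter (price.zip cost) (fun xy => xy.2 < xy.1)
      (fun xy => if xy.1 ≥ p ∧ p > xy.2 then p - xy.2 else 0)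
      (fun a _ hna => by simp only [ite_eq_right_iff]; intro hc; exact absurd (by omega) hna)]
  rw [← hpairs, sum_ite_eq_mul_sub]

-- ===== VERDICT (by name: the statement is the Claim_ definition above) =====
theorem solution_spec : Claim_equal_solution := by
  intro price cost _
  unfold Spec_solution solution solution_alt
  simp only []
  congr 1
  apply PySem.List.foldl_congr_mem
  intro acc p hp
  rw [table_getD_eq price cost p hp]
  rfl
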